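-- pv_equiv track=rewrite | github.com/ognick/minesweeper | solver.py | is_valid_layout
-- ===== SOURCE A (Python) =====
-- def is_valid_layout(places: int, mines: int, num: int) -> bool:
--     length = 0
--     active_bits_count = 0
--     while num > 0:
--         if (num & 0b1) > 0:
--             active_bits_count += 1
--             if active_bits_count > mines:
--                 return False
--
--         length += 1
--         if length > places:
--             return False
--
--         num >>= 1
--
--     return mines == active_bits_count
-- ===== SOURCE B (Python) =====
-- def is_valid_layout(places: int, mines: int, num: int) -> bool:
--     if num <= 0:
--         return mines == 0
--     return num.bit_length() <= places and bin(num).count('1') == mines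
-- ===== Notes on version B (the rewrite author's own statement) =====
-- stated objective: simpler
-- what changed: Replaces the hand-written bit-scanning while loop with early exits by a closed-form check using int.bit_length() and a popcount via bin(num).count('1'), with the num <= 0 case handled up front.
import Mathlib
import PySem

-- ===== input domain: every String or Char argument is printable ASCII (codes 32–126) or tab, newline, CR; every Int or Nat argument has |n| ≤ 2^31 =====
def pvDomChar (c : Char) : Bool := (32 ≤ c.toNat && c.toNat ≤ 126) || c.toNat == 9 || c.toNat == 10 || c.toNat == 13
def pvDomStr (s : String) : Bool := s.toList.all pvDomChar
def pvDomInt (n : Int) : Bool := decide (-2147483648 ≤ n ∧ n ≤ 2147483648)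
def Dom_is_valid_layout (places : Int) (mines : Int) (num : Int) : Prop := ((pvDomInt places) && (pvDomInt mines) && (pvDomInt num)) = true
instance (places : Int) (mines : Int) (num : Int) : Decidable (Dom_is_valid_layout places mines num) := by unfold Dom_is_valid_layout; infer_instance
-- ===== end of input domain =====

-- B replaces A's bit-scanning while loop (with early exits) by a direct check of
-- bit_length ≤ places and bit count = mines, guarding num ≤ 0 first; objective: simpler.


-- ===== PORT A =====
-- the while loop of A, state (num, length, active_bits_count); `num & 0b1` is
-- PySem.Int.band, `num >>= 1` is Lean's `>>>` (Python-exact per PYSEM).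
def is_valid_layout_go (places mines : Int) (num length active : Int) : Bool :=
  if h : 0 < num then
    if PySem.Int.band num 1 > 0 then
      if active + 1 > mines then false
      else if length + 1 > places then false
      else is_valid_layout_go places mines (num >>> (1 : Nat)) (length + 1) (active + 1)
    else
      if length + 1 > places then false
      else is_valid_layout_go places mines (num >>> (1 : Nat)) (length + 1) active
  else
    mines == active
termination_by num.toNat
decreasing_by all_goals · rw [Int.shiftRight_eq_div_pow, pow_one]; omega

def is_valid_layout (places : Int) (mines : Int) (num : Int) : Bool :=
  is_valid_layout_go places mines num 0 0

-- ===== PORT B =====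
def is_valid_layout_alt (places : Int) (mines : Int) (num : Int) : Bool :=
  if num ≤ 0 then
    mines == 0
  else
    -- num.bit_length() and bin(num).count('1') are PySem.Int.bitLength / bitCount
    decide ((PySem.Int.bitLength num : Int) ≤ places) &&
      decide ((PySem.Int.bitCount num : Int) = mines)

-- ===== PRECONDITION & SPEC =====
def Spec_is_valid_layout (places : Int) (mines : Int) (num : Int) (out : Bool) : Prop := out = is_valid_layout_alt places mines num
instance (places : Int) (mines : Int) (num : Int) (out : Bool) : Decidable (Spec_is_valid_layout places mines num out) := by unfold Spec_is_valid_layout; infer_instance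

-- ===== CLAIM (what is proved, stated in full; the proofs are below) =====
def Claim_equal_is_valid_layout : Prop := ∀ (places : Int) (mines : Int) (num : Int), Dom_is_valid_layout places mines num → Spec_is_valid_layout places mines num (is_valid_layout places mines num)

-- ===== LEMMAS AND PROOFS =====

theorem is_valid_layout_go_eq (places mines : Int) :
    ∀ n : Nat, ∀ length active : Int,
      is_valid_layout_go places mines (n : Int) length active =
        (if n = 0 then (mines == active) else
          (decide (length + (PySem.Int.bitLength (n : Int) : Int) ≤ places) &&
            decide (active + (PySem.Int.bitCount (n : Int) : Int) = mines))) := by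
  intro n
  induction n using Nat.strong_induction_on with
  | _ n ih =>
    intro length active
    rw [is_valid_layout_go]
    rcases Nat.eq_zero_or_pos n with h0 | h0
    · subst h0; simp
    · have hpos : (0:Int) < (n:Int) := by exact_mod_cast h0
      have hs : ((n:Int) >>> (1 : Nat)) = (((n/2 : Nat)) : Int) := by
        rw [Int.shiftRight_eq_div_pow, pow_one]; omega
      have hb1 : PySem.Int.band (n:Int) 1 = ((n % 2 : Nat) : Int) := by
        simpa [Nat.and_one_is_mod] using PySem.Int.band_natCast n 1
      have hlen := PySem.Int.bitLength_natCast (m := n) h0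
      have hcnt := PySem.Int.bitCount_natCast (m := n) h0
      rw [dif_pos hpos, hs, hb1, ih (n / 2) (by omega), ih (n / 2) (by omega), hlen, hcnt]
      rcases Nat.eq_zero_or_pos (n / 2) with h2 | h2
      · have h1 : n = 1 := by omega
        subst h1
        rw [Bool.eq_iff_iff]
        have e1 : PySem.Int.bitLength (((1/2 : Nat)) : Int) = 0 := by decide
        have e2 : PySem.Int.bitCount (((1/2 : Nat)) : Int) = 0 := by decide
        rw [e1, e2]
        split_ifs <;>
          (try simp only [false_iff, not_and, Bool.and_eq_true,
            decide_eq_true_eq, beq_iff_eq]) <;>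
          first | omega | exact False.elim (by assumption)
      · rw [Bool.eq_iff_iff]
        split_ifs <;>
          (try simp only [false_iff, not_and, Bool.and_eq_true,
            decide_eq_true_eq, beq_iff_eq]) <;> omega

-- ===== VERDICT (by name: the statement is the Claim_ definition above) =====
theorem is_valid_layout_spec : Claim_equal_is_valid_layout := by
  intro places mines num _
  unfold Spec_is_valid_layout is_valid_layout is_valid_layout_alt
  by_cases h : num ≤ 0
  · rw [is_valid_layout_go]
    simp [show ¬ (0 < num) by omega, h]
  · have hn : num = ((num.toNat : Nat) : Int) := by omega
    have h0 : ¬ (num.toNat = 0) := by omega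
    rw [hn, is_valid_layout_go_eq, if_neg h0, ← hn, if_neg h]
    simp
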